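-- pv_equiv track=rewrite | github.com/hphilamore/EMAT10007-2020- | week 4/bottles_of_beer_recursive_solution.py | FillVerses
-- ===== SOURCE A (Python) =====
-- def FillVerses(Number):
--     """
--     Recursive solution for BottlesOfBeer
--
--     The way recursion works is by calling a function from within itself, going
--     as many layers deep as is necessary. This means that the function only returns
--     a result when the final function call meets some condition and does not call
--     itself, instead returning its result back to the function which called it.
--     Therefore we must deal with such "edge cases". In this example, when there are
--     no more bottles of beer left on the wall, we just return an empty list to add to
--     the rest of the lists.
--     """
--
--     if Number == 0:
--         return []
--
--     BottlesOfBeer = [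
--         "{0} bottles of beer on the wall, {0} bottles of beer.\n".format(Number) + \
--         "Take one down, pass it around, {0} bottles of beer on the wall.".format(Number - 1)
--     ]
--
--     return BottlesOfBeer + FillVerses(Number - 1)
-- ===== SOURCE B (Python) =====
-- def FillVerses(Number):
--     return [
--         "{0} bottles of beer on the wall, {0} bottles of beer.\n"
--         "Take one down, pass it around, {1} bottles of beer on the wall.".format(n, n - 1)
--         for n in range(Number, 0, -1)
--     ]
-- ===== Notes on version B (the rewrite author's own statement) =====
-- stated objective: simpler
-- what changed: Replaced the linear recursion (verse prepended to a recursive call) by a single list comprehension over a descending range, with no recursion and no call stack.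
import Mathlib
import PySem

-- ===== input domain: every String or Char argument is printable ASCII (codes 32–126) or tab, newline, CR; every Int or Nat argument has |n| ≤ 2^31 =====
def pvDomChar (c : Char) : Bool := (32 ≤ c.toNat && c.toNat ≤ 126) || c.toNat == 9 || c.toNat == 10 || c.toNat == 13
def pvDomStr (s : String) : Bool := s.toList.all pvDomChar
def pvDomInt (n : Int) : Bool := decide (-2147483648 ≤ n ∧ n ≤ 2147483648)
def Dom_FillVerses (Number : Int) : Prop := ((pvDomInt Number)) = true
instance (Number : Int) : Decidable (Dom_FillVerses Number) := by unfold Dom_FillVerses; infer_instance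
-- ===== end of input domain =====

-- B replaces A's linear recursion by a list comprehension over range(Number, 0, -1): simpler, no recursion.


-- ===== PORT A =====
-- the verse string of both Pythons' str.format calls (identical text in A and B)
def pvVerse (n : Int) : String :=
  PySem.Int.toStr n ++ " bottles of beer on the wall, " ++ PySem.Int.toStr n ++
  " bottles of beer.\nTake one down, pass it around, " ++ PySem.Int.toStr (n - 1) ++
  " bottles of beer on the wall."

-- A's recursion, with a Nat fuel making it total (fuel = Number.toNat + 1 suffices on Pre_)
def FillVersesA (Number : Int) : Nat → List String
  | 0 => []
  | f + 1 => if Number = 0 then [] else pvVerse Number :: FillVersesA (Number - 1) f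

def FillVerses (Number : Int) : List String := FillVersesA Number (Number.toNat + 1)

-- ===== PORT B =====
def FillVerses_alt (Number : Int) : List String :=
  (PySem.List.pyRange Number 0 (-1)).map pvVerse

-- ===== PRECONDITION & SPEC =====
-- Pre_ excludes negative Number, on which Python A recurses forever (RecursionError)
def Pre_FillVerses (Number : Int) : Prop := 0 ≤ Number
instance (Number : Int) : Decidable (Pre_FillVerses Number) := by unfold Pre_FillVerses; infer_instance
def pvWitness_FillVerses : Int := (3)

def Spec_FillVerses (Number : Int) (out : List String) : Prop := out = FillVerses_alt Number
instance (Number : Int) (out : List String) : Decidable (Spec_FillVerses Number out) := by unfold Spec_FillVerses; infer_instance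

-- ===== CLAIM (what is proved, stated in full; the proofs are below) =====
def Claim_equal_FillVerses : Prop := ∀ (Number : Int), Dom_FillVerses Number → Pre_FillVerses Number → Spec_FillVerses Number (FillVerses Number)

-- ===== LEMMAS AND PROOFS =====
theorem FillVersesA_eq_map (n : Nat) : ∀ (N : Int), N = n →
    FillVersesA N (n + 1) = (PySem.List.pyRange N 0 (-1)).map pvVerse := by
  induction n with
  | zero =>
    intro N hN; subst hN
    simp [FillVersesA, PySem.List.pyRange_neg_one_eq_nil (le_refl (0 : Int))]
  | succ n ih =>
    intro N hN
    have hpos : (0 : Int) < N := by omega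
    rw [PySem.List.pyRange_neg_one_cons hpos]
    have hne : N ≠ 0 := by omega
    simp only [FillVersesA, if_neg hne, List.map_cons]
    congr 1
    exact ih (N - 1) (by omega)

-- ===== VERDICT (by name: the statement is the Claim_ definition above) =====
theorem FillVerses_spec : Claim_equal_FillVerses := by
  intro N _ hpre
  unfold Pre_FillVerses at hpre
  unfold Spec_FillVerses FillVerses
  have h := FillVersesA_eq_map N.toNat N (by omega)
  exact h
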